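-- pv_equiv track=rewrite | github.com/dgbowl/yadg | src/yadg/parsers/xrdtrace/common.py | panalytical_comment
-- ===== SOURCE A (Python) =====
-- def panalytical_comment(line: str) -> dict:
--     """Processes a comments from the file header into a dictionary.
--
--     Parameters
--     ----------
--     line
--         A line containing the comment.
--
--     Returns
--     -------
--     dict
--         A dictionary containing the processed comment.
--
--     """
--
--     if line.startswith("Configuration="):
--         split = [s.split("=") for s in line.split(", ")]
--         __, values = list(zip(*split))
--         keys = ["configuration", "owner", "creation_date"]
--     elif line.startswith("Goniometer="):
--         split = [s.replace("=", ":").split(":") for s in line.split(";")]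
--         __, values = list(zip(*split))
--         keys = ["goniometer", "min_step_size_2theta", "min_step_size_omega"]
--     elif line.startswith("Sample stage="):
--         __, values = line.split("=")
--         keys = ["sample_stage"]
--     elif line.startswith("Diffractometer system="):
--         __, values = line.split("=")
--         keys = ["diffractometer_system"]
--     elif line.startswith("Measurement program="):
--         split = [s.split("=") for s in line.split(", ")]
--         __, values = list(zip(*split))
--         keys = ["measurement_program", "identifier"]
--     elif line.startswith("Fine Calibration Offset for 2Theta"):
--         __, values = line.split(" = ")
--         keys = ["calib_offset_2theta"]
--     values = [values] if isinstance(values, str) else values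
--     return dict(zip(keys, values))
-- ===== SOURCE B (Python) =====
-- # Recursive cursor parser: walks the line with str.find and slices, emitting one
-- # (key, value) pair per record, instead of A's split/replace/zip(*) transposition.
--
-- def _value(rec, sep):
--     """Text between the first occurrence of sep and the next one (or the end)."""
--     i = rec.find(sep)
--     if i == -1:
--         return ""
--     j = rec.find(sep, i + len(sep))
--     return rec[i + len(sep):] if j == -1 else rec[i + len(sep):j]
--
--
-- def _parse(s, keys, rsep, sep, norm=None):
--     """Consume one record per key, cutting records off at rsep with a cursor."""
--     if not keys:
--         return []
--     i = s.find(rsep)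
--     rec = s if i == -1 else s[:i]
--     if norm is not None:
--         rec = norm(rec)
--     pair = (keys[0], _value(rec, sep))
--     if i == -1:
--         return [pair]
--     return [pair] + _parse(s[i + len(rsep):], keys[1:], rsep, sep, norm)
--
--
-- def panalytical_comment(line: str) -> dict:
--     if line.startswith("Configuration="):
--         return dict(_parse(line, ["configuration", "owner", "creation_date"], ", ", "="))
--     if line.startswith("Goniometer="):
--         return dict(_parse(line, ["goniometer", "min_step_size_2theta", "min_step_size_omega"],
--                            ";", ":", lambda r: r.replace("=", ":")))
--     if line.startswith("Sample stage="):
--         return {"sample_stage": _value(line, "=")}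
--     if line.startswith("Diffractometer system="):
--         return {"diffractometer_system": _value(line, "=")}
--     if line.startswith("Measurement program="):
--         return dict(_parse(line, ["measurement_program", "identifier"], ", ", "="))
--     if line.startswith("Fine Calibration Offset for 2Theta"):
--         return {"calib_offset_2theta": _value(line, " = ")}
--     raise ValueError("unrecognised comment line: " + line)
-- ===== Notes on version B (the rewrite author's own statement) =====
-- stated objective: alternative
-- what changed: Replaces A's split/replace/zip(*) list transposition per branch with a recursive cursor parser that walks the line with str.find and slicing, cutting one record off per key and extracting each value as the text between the first key-value separator and its next occurrence (or the end of the record).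
import Mathlib
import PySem

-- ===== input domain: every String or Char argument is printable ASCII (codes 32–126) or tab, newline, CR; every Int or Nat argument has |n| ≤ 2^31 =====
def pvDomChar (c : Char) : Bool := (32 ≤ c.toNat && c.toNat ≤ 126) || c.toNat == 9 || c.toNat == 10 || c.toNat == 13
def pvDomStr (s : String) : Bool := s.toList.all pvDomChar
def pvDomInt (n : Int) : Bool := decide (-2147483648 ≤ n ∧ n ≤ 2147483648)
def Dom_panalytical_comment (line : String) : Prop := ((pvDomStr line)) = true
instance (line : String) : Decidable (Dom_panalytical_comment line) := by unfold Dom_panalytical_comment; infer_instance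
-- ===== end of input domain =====

-- B replaces A's split/replace/zip(*) transposition by a recursive find/slice cursor parser (objective: alternative).

-- ===== PORT A =====
-- s.split(sep) for a non-empty literal sep (Chars.split? is none only for sep = "")
def pvSplitC (s sep : List Char) : List (List Char) := (PySem.Chars.split? s sep).getD []

-- list(zip(*ls)) on a list of char-list-lists: rows truncated to the common minimum length, transposed.
def pvZipStar (ls : List (List (List Char))) : List (List (List Char)) :=
  let n := ((ls.map List.length).min?).getD 0
  (List.range n).map (fun i => ls.map (fun l => l.getD i []))

-- dict(zip(keys, values)) with A's literal distinct keys = the truncating zip as an assoc list.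
def panalytical_comment (line : String) : List (String × String) :=
  let cs := line.toList
  if PySem.Chars.startswith cs "Configuration=".toList then
    let split := (pvSplitC cs ", ".toList).map (fun s => pvSplitC s "=".toList)
    match pvZipStar split with
    | [_, values] => List.zip ["configuration", "owner", "creation_date"] (values.map String.ofList)
    | _ => []  -- Python raises ValueError (tuple unpacking); excluded by Pre_
  else if PySem.Chars.startswith cs "Goniometer=".toList then
    let split := (pvSplitC cs ";".toList).map
      (fun s => pvSplitC (PySem.Chars.replace s "=".toList ":".toList) ":".toList)
    match pvZipStar split with
    | [_, values] => List.zip ["goniometer", "min_step_size_2theta", "min_step_size_omega"] (values.map String.ofList)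
    | _ => []  -- ValueError; excluded by Pre_
  else if PySem.Chars.startswith cs "Sample stage=".toList then
    match pvSplitC cs "=".toList with
    | [_, values] => List.zip ["sample_stage"] [String.ofList values]
    | _ => []  -- ValueError; excluded by Pre_
  else if PySem.Chars.startswith cs "Diffractometer system=".toList then
    match pvSplitC cs "=".toList with
    | [_, values] => List.zip ["diffractometer_system"] [String.ofList values]
    | _ => []  -- ValueError; excluded by Pre_
  else if PySem.Chars.startswith cs "Measurement program=".toList then
    let split := (pvSplitC cs ", ".toList).map (fun s => pvSplitC s "=".toList)
    match pvZipStar split with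
    | [_, values] => List.zip ["measurement_program", "identifier"] (values.map String.ofList)
    | _ => []  -- ValueError; excluded by Pre_
  else if PySem.Chars.startswith cs "Fine Calibration Offset for 2Theta".toList then
    match pvSplitC cs " = ".toList with
    | [_, values] => List.zip ["calib_offset_2theta"] [String.ofList values]
    | _ => []  -- ValueError; excluded by Pre_
  else []  -- Python raises UnboundLocalError; excluded by Pre_

-- ===== PORT B =====
-- Source B _value: text between the first occurrence of sep and the next one (or the end).
def pvValue (rec sep : List Char) : List Char :=
  let i := PySem.Chars.find rec sep
  if i = -1 then []
  else
    let j := PySem.Chars.findFrom rec sep (i + sep.length)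
    if j = -1 then PySem.Chars.slice rec (some (i + sep.length)) none
    else PySem.Chars.slice rec (some (i + sep.length)) (some j)

-- Source B's optional per-record normalisation (norm is None or a function)
def pvNorm (norm : Option (List Char → List Char)) (r : List Char) : List Char :=
  match norm with
  | some f => f r
  | none => r

-- Source B _parse: one record per key, records cut off at rsep with a cursor.
def pvParse (s : List Char) (keys : List String) (rsep sep : List Char)
    (norm : Option (List Char → List Char)) : List (String × String) :=
  match keys with
  | [] => []
  | k :: krest =>
    let i := PySem.Chars.find s rsep
    let rec0 := if i = -1 then s else PySem.Chars.slice s none (some i)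
    let pair := (k, String.ofList (pvValue (pvNorm norm rec0) sep))
    if i = -1 then [pair]
    else pair :: pvParse (PySem.Chars.slice s (some (i + rsep.length)) none) krest rsep sep norm

-- dict(pairs): fold the pairs into a PySem.Dict, return its items.
def pvDictOf (l : List (String × String)) : List (String × String) :=
  (l.foldl (fun d p => d.insert p.1 p.2) PySem.Dict.empty).items

def panalytical_comment_alt (line : String) : List (String × String) :=
  let cs := line.toList
  if PySem.Chars.startswith cs "Configuration=".toList then
    pvDictOf (pvParse cs ["configuration", "owner", "creation_date"] ", ".toList "=".toList none)
  else if PySem.Chars.startswith cs "Goniometer=".toList then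
    pvDictOf (pvParse cs ["goniometer", "min_step_size_2theta", "min_step_size_omega"] ";".toList ":".toList
      (some (fun r => PySem.Chars.replace r "=".toList ":".toList)))
  else if PySem.Chars.startswith cs "Sample stage=".toList then
    [("sample_stage", String.ofList (pvValue cs "=".toList))]
  else if PySem.Chars.startswith cs "Diffractometer system=".toList then
    [("diffractometer_system", String.ofList (pvValue cs "=".toList))]
  else if PySem.Chars.startswith cs "Measurement program=".toList then
    pvDictOf (pvParse cs ["measurement_program", "identifier"] ", ".toList "=".toList none)
  else if PySem.Chars.startswith cs "Fine Calibration Offset for 2Theta".toList then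
    [("calib_offset_2theta", String.ofList (pvValue cs " = ".toList))]
  else []  -- Python raises ValueError; excluded by Pre_

-- ===== PRECONDITION & SPEC =====
-- every record yields at least two kv-fields and the shortest exactly two (Python's tuple unpack of zip(*...))
abbrev pvOk2 (recs : List (List (List Char))) : Prop :=
  (∀ r ∈ recs, 2 ≤ r.length) ∧ (∃ r ∈ recs, r.length = 2)

-- Pre_ = exactly the inputs on which A returns: a recognised prefix, and the field counts its tuple unpacking needs.
def Pre_panalytical_comment (line : String) : Prop :=
  let cs := line.toList
  if PySem.Chars.startswith cs "Configuration=".toList then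
    pvOk2 ((pvSplitC cs ", ".toList).map (fun s => pvSplitC s "=".toList))
  else if PySem.Chars.startswith cs "Goniometer=".toList then
    pvOk2 ((pvSplitC cs ";".toList).map
      (fun s => pvSplitC (PySem.Chars.replace s "=".toList ":".toList) ":".toList))
  else if PySem.Chars.startswith cs "Sample stage=".toList then
    (pvSplitC cs "=".toList).length = 2
  else if PySem.Chars.startswith cs "Diffractometer system=".toList then
    (pvSplitC cs "=".toList).length = 2
  else if PySem.Chars.startswith cs "Measurement program=".toList then
    pvOk2 ((pvSplitC cs ", ".toList).map (fun s => pvSplitC s "=".toList))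
  else if PySem.Chars.startswith cs "Fine Calibration Offset for 2Theta".toList then
    (pvSplitC cs " = ".toList).length = 2
  else False

instance (line : String) : Decidable (Pre_panalytical_comment line) := by
  unfold Pre_panalytical_comment; infer_instance

def pvWitness_panalytical_comment : String := "Sample stage=a"

def Spec_panalytical_comment (line : String) (out : List (String × String)) : Prop :=
  out = panalytical_comment_alt line
instance (line : String) (out : List (String × String)) : Decidable (Spec_panalytical_comment line out) := by
  unfold Spec_panalytical_comment; infer_instance

-- ===== CLAIM (what is proved, stated in full; the proofs are below) =====
def Claim_equal_panalytical_comment : Prop := ∀ (line : String), Dom_panalytical_comment line → Pre_panalytical_comment line → Spec_panalytical_comment line (panalytical_comment line)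

-- ===== LEMMAS AND PROOFS =====

-- a direct structural splitter on a non-empty separator c0 :: ctail, used only in the proofs
def pvSplitRec (c0 : Char) (ctail : List Char) : List Char → List (List Char)
  | [] => [[]]
  | c :: rest =>
    if (c0 :: ctail).isPrefixOf (c :: rest) then
      [] :: pvSplitRec c0 ctail (rest.drop ctail.length)
    else (pvSplitRec c0 ctail rest).modifyHead (c :: ·)
termination_by l => l.length
decreasing_by
  · simp only [List.length_drop, List.length_cons]; omega
  · simp only [List.length_cons]; omega

theorem pvModifyHead_id {α : Type} (l : List α) : List.modifyHead (fun x => x) l = l := by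
  cases l <;> simp

theorem pvModifyHead_comp {α : Type} (f g : α → α) (l : List α) :
    (l.modifyHead g).modifyHead f = l.modifyHead (fun x => f (g x)) := by
  cases l <;> simp

theorem pvGoSpec (c0 : Char) (ctail : List Char) :
    ∀ (fuel : Nat) (l cur : List Char) (acc : List (List Char)), l.length ≤ fuel →
      PySem.Chars.splitOn.go (c0 :: ctail) fuel l cur acc
        = acc.reverse ++ (pvSplitRec c0 ctail l).modifyHead (cur.reverse ++ ·) := by
  intro fuel
  induction fuel with
  | zero =>
    intro l cur acc hl
    have : l = [] := by cases l <;> simp_all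
    subst this
    rw [PySem.Chars.splitOn.go.eq_def]
    simp [pvSplitRec]
  | succ fuel ih =>
    intro l cur acc hl
    cases l with
    | nil =>
      rw [PySem.Chars.splitOn.go.eq_def]
      simp [pvSplitRec]
    | cons c rest =>
      rw [PySem.Chars.splitOn.go.eq_def]
      by_cases hpre : (c0 :: ctail).isPrefixOf (c :: rest) = true
      · simp only [hpre, if_true]
        have hdrop : List.drop (c0 :: ctail).length (c :: rest) = rest.drop ctail.length := by
          simp [List.length_cons]
        rw [hdrop, ih _ [] _ (by simp [List.length_drop] at *; omega)]
        rw [pvSplitRec, if_pos hpre]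
        simp [pvModifyHead_id]
      · simp only [hpre, Bool.false_eq_true, if_false]
        rw [ih _ (c :: cur) _ (by simp at hl ⊢; omega)]
        rw [pvSplitRec, if_neg hpre, pvModifyHead_comp]
        have hfun : (fun x : List Char => (c :: cur).reverse ++ x)
            = (fun x : List Char => cur.reverse ++ c :: x) := by
          funext x; simp
        rw [hfun]
  
theorem pvSplitOn_eq (c0 : Char) (ctail : List Char) (l : List Char) :
    PySem.Chars.splitOn l (c0 :: ctail) = pvSplitRec c0 ctail l := by
  unfold PySem.Chars.splitOn
  rw [pvGoSpec c0 ctail (l.length + 1) l [] [] (by omega)]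
  simp [pvModifyHead_id]

theorem pvSplitC_eq (c0 : Char) (ctail : List Char) (l : List Char) :
    pvSplitC l (c0 :: ctail) = pvSplitRec c0 ctail l := by
  simp [pvSplitC, PySem.Chars.split?, pvSplitOn_eq]

theorem pvSplitRec_of_not_infix (c0 : Char) (ctail l : List Char)
    (h : ¬ (c0 :: ctail) <:+: l) : pvSplitRec c0 ctail l = [l] := by
  induction l with
  | nil => rw [pvSplitRec]
  | cons c rest ih =>
    have hnp : ¬ (c0 :: ctail).isPrefixOf (c :: rest) = true := by
      intro hp
      exact h (List.IsPrefix.isInfix (List.isPrefixOf_iff_prefix.mp hp))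
    rw [pvSplitRec, if_neg hnp, ih (fun hi => h (List.infix_cons hi))]
    rfl

theorem pvSplitRec_of_first (c0 : Char) (ctail : List Char) :
    ∀ (n : Nat) (l : List Char), (c0 :: ctail) <+: l.drop n →
      (∀ i < n, ¬ (c0 :: ctail) <+: l.drop i) →
      pvSplitRec c0 ctail l
        = l.take n :: pvSplitRec c0 ctail (l.drop (n + ctail.length + 1)) := by
  intro n
  induction n with
  | zero =>
    intro l h1 _
    cases l with
    | nil => simp at h1
    | cons c rest =>
      rw [pvSplitRec, if_pos (List.isPrefixOf_iff_prefix.mpr (by simpa using h1))]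
      simp
  | succ n ih =>
    intro l h1 h2
    cases l with
    | nil => simp at h1
    | cons c rest =>
      have hnp : ¬ (c0 :: ctail).isPrefixOf (c :: rest) = true := by
        intro hp
        exact h2 0 (by omega) (by simpa using List.isPrefixOf_iff_prefix.mp hp)
      rw [pvSplitRec, if_neg hnp]
      rw [ih rest (by simpa using h1) (fun i hi => by simpa using h2 (i + 1) (by omega))]
      have harith : n + ctail.length + 1 = n + 1 + ctail.length := by omega
      simp [List.take_succ_cons, List.drop_succ_cons, harith]

theorem pvSplitRec_find (c0 : Char) (ctail l : List Char) :
    pvSplitRec c0 ctail l =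
      if PySem.Chars.find l (c0 :: ctail) = -1 then [l]
      else l.take (PySem.Chars.find l (c0 :: ctail)).toNat ::
        pvSplitRec c0 ctail (l.drop ((PySem.Chars.find l (c0 :: ctail)).toNat + ctail.length + 1)) := by
  by_cases h : PySem.Chars.find l (c0 :: ctail) = -1
  · rw [if_pos h]
    exact pvSplitRec_of_not_infix c0 ctail l ((PySem.Chars.find_eq_neg_one_iff l _).mp h)
  · rw [if_neg h]
    have h0 : 0 ≤ PySem.Chars.find l (c0 :: ctail) := by
      have := PySem.Chars.neg_one_le_find l (c0 :: ctail)
      omega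
    obtain ⟨hp, hmin⟩ := PySem.Chars.find_spec h0
    exact pvSplitRec_of_first c0 ctail _ l hp hmin

-- the value B extracts from a record equals field [1] of A's split, whenever that field exists
theorem pvValue_getD (c0 : Char) (ctail l : List Char)
    (h : 2 ≤ (pvSplitRec c0 ctail l).length) :
    pvValue l (c0 :: ctail) = (pvSplitRec c0 ctail l).getD 1 [] := by
  have hne : PySem.Chars.find l (c0 :: ctail) ≠ -1 := by
    intro hf
    rw [pvSplitRec_find, if_pos hf] at h
    simp at h
  have h0 : 0 ≤ PySem.Chars.find l (c0 :: ctail) := by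
    have := PySem.Chars.neg_one_le_find l (c0 :: ctail)
    omega
  set n := (PySem.Chars.find l (c0 :: ctail)).toNat with hn
  have hf : PySem.Chars.find l (c0 :: ctail) = (n : Int) := by omega
  obtain ⟨hp, _⟩ := PySem.Chars.find_spec h0
  have hlen : n + (ctail.length + 1) ≤ l.length := by
    have h1 := hp.length_le
    have h2 : (PySem.Chars.find l (c0 :: ctail)) ≤ (l.length : Int) :=
      PySem.Chars.find_le_length l _
    simp [List.length_drop, List.length_cons] at h1
    omega
  have hsplit := pvSplitRec_find c0 ctail l
  rw [if_neg hne] at hsplit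
  unfold pvValue
  rw [if_neg hne]
  have hcast : PySem.Chars.find l (c0 :: ctail) + ((c0 :: ctail).length : Int)
      = ((n + (ctail.length + 1) : Nat) : Int) := by
    rw [hf]; push_cast [List.length_cons]; ring
  rw [hcast, PySem.Chars.findFrom_natCast l _ _ hlen]
  set l' := l.drop (n + (ctail.length + 1)) with hl'
  have hdropeq : l.drop (n + ctail.length + 1) = l' := by
    rw [hl']; ring_nf
  rw [hdropeq] at hsplit
  by_cases hm : PySem.Chars.find l' (c0 :: ctail) = -1
  · rw [if_pos hm]
    rw [PySem.Chars.slice_eq_listSlice, PySem.List.slice_from l (by positivity)]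
    have : ((n + (ctail.length + 1) : Nat) : Int).toNat = n + (ctail.length + 1) := by omega
    rw [this, ← hl']
    rw [hsplit, pvSplitRec_of_not_infix c0 ctail l' ((PySem.Chars.find_eq_neg_one_iff l' _).mp hm)]
    rfl
  · rw [if_neg hm]
    have hm0 : 0 ≤ PySem.Chars.find l' (c0 :: ctail) := by
      have := PySem.Chars.neg_one_le_find l' (c0 :: ctail)
      omega
    set m := (PySem.Chars.find l' (c0 :: ctail)).toNat with hmdef
    have hmf : PySem.Chars.find l' (c0 :: ctail) = (m : Int) := by omega
    have hnz : ¬ ((n + (ctail.length + 1) : Nat) : Int) + PySem.Chars.find l' (c0 :: ctail) = -1 := by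
      omega
    rw [if_neg hnz]
    have hcast2 : ((n + (ctail.length + 1) : Nat) : Int) + PySem.Chars.find l' (c0 :: ctail)
        = ((n + (ctail.length + 1) + m : Nat) : Int) := by
      rw [hmf]; push_cast; ring
    rw [hcast2, PySem.Chars.slice_eq_listSlice, PySem.List.slice_natCast]
    have htake : n + (ctail.length + 1) + m - (n + (ctail.length + 1)) = m := by omega
    rw [htake, ← hl']
    have hsplit' := pvSplitRec_find c0 ctail l'
    rw [if_neg hm, ← hmdef] at hsplit'
    rw [hsplit, hsplit']
    rfl

-- B's parser equals "zip keys with the per-record values over the record split"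
theorem pvParse_eq (r0 : Char) (rtail sep : List Char) (norm : Option (List Char → List Char)) :
    ∀ (keys : List String) (s : List Char),
      pvParse s keys (r0 :: rtail) sep norm
        = List.zip keys ((pvSplitRec r0 rtail s).map
            (fun r => String.ofList (pvValue (pvNorm norm r) sep))) := by
  intro keys
  induction keys with
  | nil => intro s; rfl
  | cons k krest ih =>
    intro s
    rw [pvParse]
    by_cases hf : PySem.Chars.find s (r0 :: rtail) = -1
    · rw [pvSplitRec_find, if_pos hf]
      simp [hf]
    · simp only [if_neg hf]
      have h0 : 0 ≤ PySem.Chars.find s (r0 :: rtail) := by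
        have := PySem.Chars.neg_one_le_find s (r0 :: rtail)
        omega
      set n := (PySem.Chars.find s (r0 :: rtail)).toNat with hn
      have hff : PySem.Chars.find s (r0 :: rtail) = (n : Int) := by omega
      rw [pvSplitRec_find, if_neg hf]
      have hslice1 : PySem.Chars.slice s none (some (PySem.Chars.find s (r0 :: rtail))) = s.take n := by
        rw [PySem.Chars.slice_eq_listSlice, PySem.List.slice_to s h0, ← hn]
      have hslice2 : PySem.Chars.slice s (some (PySem.Chars.find s (r0 :: rtail) + ((r0 :: rtail).length : Int))) none
          = s.drop (n + rtail.length + 1) := by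
        rw [PySem.Chars.slice_eq_listSlice, PySem.List.slice_from s (by simp [List.length_cons]; omega)]
        congr 1
        rw [hff]
        simp [List.length_cons]
        omega
      rw [hslice1, hslice2, ih]
      simp [List.zip, ← hn]
  
-- the truncating zip picks up a prefix of the keys
theorem pvZipFstPrefix {α β : Type} : ∀ (ks : List α) (vs : List β), (ks.zip vs).map Prod.fst <+: ks := by
  intro ks
  induction ks with
  | nil => intro vs; simp
  | cons k ks ih =>
    intro vs
    cases vs with
    | nil => simp
    | cons v vs => simpa using ih vs

-- dict() over pairs with distinct keys is the identity on the assoc list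
theorem pvDictOf_zip (keys : List String) (hk : keys.Nodup) (vs : List String) :
    pvDictOf (keys.zip vs) = keys.zip vs := by
  unfold pvDictOf
  rw [PySem.Dict.items_foldl_insert_fresh (keys.zip vs) Prod.fst Prod.snd PySem.Dict.empty
      (by intro a _; simp [PySem.Dict.empty])
      (List.Nodup.sublist (pvZipFstPrefix keys vs).sublist hk)]
  simp [PySem.Dict.empty]

theorem pvZipStar_eq (recs : List (List (List Char)))
    (h1 : ∀ r ∈ recs, 2 ≤ r.length) (h2 : ∃ r ∈ recs, r.length = 2) :
    pvZipStar recs = [recs.map (fun l => l.getD 0 []), recs.map (fun l : List (List Char) => l.getD 1 [])] := by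
  obtain ⟨r, hr, hr2⟩ := h2
  have hmin : (recs.map List.length).min? = some 2 := by
    rw [List.min?_eq_some_iff]
    refine ⟨List.mem_map.2 ⟨r, hr, hr2⟩, ?_⟩
    intro b hb
    obtain ⟨s, hs, hsl⟩ := List.mem_map.1 hb
    have := h1 s hs
    omega
  simp [pvZipStar, hmin, List.range_succ]

-- the per-branch multi-record equality
theorem pvBranch_multi (r0 : Char) (rtail : List Char) (c0 : Char) (ctail : List Char)
    (norm : Option (List Char → List Char)) (nf : List Char → List Char)
    (hnf : pvNorm norm = nf) (cs : List Char) (keys : List String)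
    (hk : keys.Nodup)
    (hok : pvOk2 ((pvSplitRec r0 rtail cs).map (fun s => pvSplitRec c0 ctail (nf s)))) :
    (match pvZipStar ((pvSplitRec r0 rtail cs).map (fun s => pvSplitRec c0 ctail (nf s))) with
      | [_, values] => List.zip keys (values.map String.ofList)
      | _ => ([] : List (String × String)))
    = pvDictOf (pvParse cs keys (r0 :: rtail) (c0 :: ctail) norm) := by
  subst hnf
  rw [pvZipStar_eq _ hok.1 hok.2]
  rw [pvParse_eq]
  have hvals : (pvSplitRec r0 rtail cs).map
        (fun r => String.ofList (pvValue (pvNorm norm r) (c0 :: ctail)))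
      = (((pvSplitRec r0 rtail cs).map (fun s => pvSplitRec c0 ctail (pvNorm norm s))).map
          (fun l : List (List Char) => l.getD 1 [])).map String.ofList := by
    simp only [List.map_map]
    apply List.map_congr_left
    intro r hr
    have h2 : 2 ≤ (pvSplitRec c0 ctail (pvNorm norm r)).length :=
      hok.1 _ (List.mem_map.mpr ⟨r, hr, rfl⟩)
    simp [Function.comp, pvValue_getD c0 ctail _ h2]
  rw [hvals, pvDictOf_zip keys hk]

-- ===== VERDICT (by name: the statement is the Claim_ definition above) =====
theorem panalytical_comment_spec : Claim_equal_panalytical_comment := by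
  intro line _dom hpre
  unfold Spec_panalytical_comment panalytical_comment panalytical_comment_alt
  unfold Pre_panalytical_comment at hpre
  have e1 : ", ".toList = [',', ' '] := rfl
  have e2 : "=".toList = ['='] := rfl
  have e3 : ";".toList = [';'] := rfl
  have e4 : ":".toList = [':'] := rfl
  have e5 : " = ".toList = [' ', '=', ' '] := rfl
  simp only [e1, e2, e3, e4, e5, pvSplitC_eq] at hpre ⊢
  split_ifs at hpre ⊢
  case _ =>  -- Configuration
    exact pvBranch_multi ',' [' '] '=' [] none (fun s => s) rfl line.toList _ (by decide) hpre
  case _ =>  -- Goniometer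
    exact pvBranch_multi ';' [] ':' []
      (some (fun r => PySem.Chars.replace r "=".toList ":".toList))
      (fun s => PySem.Chars.replace s "=".toList ":".toList) rfl line.toList _ (by decide) hpre
  case _ =>  -- Sample stage
    obtain ⟨a, b, hab⟩ := List.length_eq_two.mp hpre
    have hv := pvValue_getD '=' [] line.toList (by rw [hab]; simp)
    rw [hab] at hv ⊢
    simp [hv]
  case _ =>  -- Diffractometer system
    obtain ⟨a, b, hab⟩ := List.length_eq_two.mp hpre
    have hv := pvValue_getD '=' [] line.toList (by rw [hab]; simp)
    rw [hab] at hv ⊢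
    simp [hv]
  case _ =>  -- Measurement program
    exact pvBranch_multi ',' [' '] '=' [] none (fun s => s) rfl line.toList _ (by decide) hpre
  case _ =>  -- Fine Calibration Offset for 2Theta
    obtain ⟨a, b, hab⟩ := List.length_eq_two.mp hpre
    have hv := pvValue_getD ' ' ['=', ' '] line.toList (by rw [hab]; simp)
    rw [hab] at hv ⊢
    simp [hv]
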